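-- pv_equiv track=rewrite | github.com/polranirav/AI-Learning-Journey | 02 data structure and algo/6 binary search/4_binary_search_custom_objects.py | search_by_score
-- ===== SOURCE A (Python) =====
-- def search_by_score(data, target_score):
--     low, high = 0, len(data) - 1
--
--     while low <= high:
--         mid = (low + high) // 2
--         score = data[mid][1]
--
--         if score == target_score:
--             return data[mid]
--         elif score < target_score:
--             low = mid + 1
--         else:
--             high = mid - 1
--
--     return None
-- ===== SOURCE B (Python) =====
-- def search_by_score(data, target_score):
--     if not data:
--         return None
--     mid = (len(data) - 1) // 2
--     score = data[mid][1]
--     if score == target_score: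
--         return data[mid]
--     if score < target_score:
--         return search_by_score(data[mid + 1:], target_score)
--     return search_by_score(data[:mid], target_score)
-- ===== Notes on version B (the rewrite author's own statement) =====
-- stated objective: alternative
-- what changed: Replaced the iterative low/high-index while loop with a recursive divide-and-conquer that probes index (len-1)//2 of the current sublist and recurses on the slice after or before it (same probe sequence, so identical results on ties and unsorted data).
import Mathlib
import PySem

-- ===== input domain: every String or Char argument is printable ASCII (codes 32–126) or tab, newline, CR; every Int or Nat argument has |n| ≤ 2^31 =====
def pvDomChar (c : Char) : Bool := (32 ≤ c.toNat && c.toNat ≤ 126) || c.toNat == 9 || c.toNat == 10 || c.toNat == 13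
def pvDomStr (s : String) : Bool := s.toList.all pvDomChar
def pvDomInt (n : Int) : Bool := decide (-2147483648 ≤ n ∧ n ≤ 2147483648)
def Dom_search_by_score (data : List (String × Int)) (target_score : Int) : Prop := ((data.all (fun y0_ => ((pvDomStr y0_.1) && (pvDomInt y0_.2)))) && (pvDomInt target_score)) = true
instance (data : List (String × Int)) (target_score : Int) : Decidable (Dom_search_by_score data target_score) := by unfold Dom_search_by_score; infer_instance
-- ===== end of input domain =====

-- B replaces A's iterative low/high index loop by a recursive divide-and-conquer on list slices
-- with the same probe sequence; alternative decomposition, no speed claim.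

-- ===== PORT A =====
-- the while loop of A, as structural recursion over the shrinking window [low, high]
def searchLoopA (data : List (String × Int)) (target_score : Int) (low high : Int) :
    Option (String × Int) :=
  if hlh : low ≤ high then
    let mid := PySem.Int.floordiv (low + high) 2
    match PySem.List.pyGet? data mid with
    | none => none   -- IndexError; unreachable from search_by_score's initial bounds
    | some p =>
      if p.2 = target_score then some p
      else if p.2 < target_score then searchLoopA data target_score (mid + 1) high
      else searchLoopA data target_score low (mid - 1)
  else none
termination_by (high + 1 - low).toNat
decreasing_by
  · have h := PySem.Int.floordiv_two_mid_bounds (lo := low) (hi := high) hlh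
    omega
  · have h := PySem.Int.floordiv_two_mid_bounds (lo := low) (hi := high) hlh
    omega

def search_by_score (data : List (String × Int)) (target_score : Int) : Option (String × Int) :=
  searchLoopA data target_score 0 ((data.length : Int) - 1)

-- ===== PORT B =====
def search_by_score_alt (data : List (String × Int)) (target_score : Int) :
    Option (String × Int) :=
  if hne : data = [] then none
  else
    let mid := PySem.Int.floordiv ((data.length : Int) - 1) 2
    match PySem.List.pyGet? data mid with
    | none => none   -- IndexError; unreachable: 0 ≤ mid < data.length
    | some p =>
      if p.2 = target_score then some p
      else if p.2 < target_score then
        search_by_score_alt (PySem.List.slice data (some (mid + 1)) none) target_score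
      else
        search_by_score_alt (PySem.List.slice data none (some mid)) target_score
termination_by data.length
decreasing_by
  · have hlen : 1 ≤ (data.length : Int) := by
      cases data with
      | nil => exact absurd rfl hne
      | cons a l => simp
    have h := PySem.Int.floordiv_two_mid_bounds (lo := 0) (hi := (data.length : Int) - 1)
      (by omega)
    rw [zero_add] at h
    rw [PySem.List.slice_from data (by omega)]
    simp only [List.length_drop]
    omega
  · have hlen : 1 ≤ (data.length : Int) := by
      cases data with
      | nil => exact absurd rfl hne
      | cons a l => simp
    have h := PySem.Int.floordiv_two_mid_bounds (lo := 0) (hi := (data.length : Int) - 1)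
      (by omega)
    rw [zero_add] at h
    rw [PySem.List.slice_to data (by omega)]
    simp only [List.length_take]
    omega

-- ===== PRECONDITION & SPEC =====
def Spec_search_by_score (data : List (String × Int)) (target_score : Int) (out : Option (String × Int)) : Prop := out = search_by_score_alt data target_score
instance (data : List (String × Int)) (target_score : Int) (out : Option (String × Int)) : Decidable (Spec_search_by_score data target_score out) := by unfold Spec_search_by_score; infer_instance

-- ===== CLAIM (what is proved, stated in full; the proofs are below) =====
def Claim_equal_search_by_score : Prop := ∀ (data : List (String × Int)) (target_score : Int), Dom_search_by_score data target_score → Spec_search_by_score data target_score (search_by_score data target_score)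

-- ===== LEMMAS AND PROOFS =====

-- midpoint translation: (low+high)//2 = low + (high-low)//2
lemma mid_shift (low high : Int) :
    PySem.Int.floordiv (low + high) 2 = low + PySem.Int.floordiv (high - low) 2 := by
  have h1 := PySem.Int.floordiv_mul_add_mod (low + high) 2
  have h2 := PySem.Int.floordiv_mul_add_mod (high - low) 2
  have h3 := PySem.Int.mod_nonneg (low + high) (b := 2) (by omega)
  have h4 := PySem.Int.mod_lt (low + high) (b := 2) (by omega)
  have h5 := PySem.Int.mod_nonneg (high - low) (b := 2) (by omega)
  have h6 := PySem.Int.mod_lt (high - low) (b := 2) (by omega)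
  omega

-- the window [low, high] of A is the slice B recurses on
lemma loop_eq_alt (data : List (String × Int)) (t : Int) (low high : Int)
    (h0 : 0 ≤ low) (hm1 : -1 ≤ high) (h1 : high < (data.length : Int)) :
    searchLoopA data t low high =
      search_by_score_alt (PySem.List.slice data (some low) (some (high + 1))) t := by
  have hsub : PySem.List.slice data (some low) (some (high + 1)) =
      List.take ((high + 1).toNat - low.toNat) (List.drop low.toNat data) :=
    PySem.List.slice_toNat data h0 (by omega)
  by_cases hlh : low ≤ high
  · -- window nonempty
    have hmid := PySem.Int.floordiv_two_mid_bounds (lo := low) (hi := high) hlh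
    set mid := PySem.Int.floordiv (low + high) 2 with hmiddef
    have hms := mid_shift low high
    have hlens : (PySem.List.slice data (some low) (some (high + 1))).length =
        (high + 1 - low).toNat := by
      rw [hsub]; simp only [List.length_take, List.length_drop]; omega
    have hne : PySem.List.slice data (some low) (some (high + 1)) ≠ [] := by
      intro hc; rw [hc] at hlens; simp at hlens; omega
    rw [searchLoopA, search_by_score_alt]
    simp only [hlh, reduceDIte, hne, reduceDIte, hlens]
    -- B's midpoint in the sublist
    have hmidB : PySem.Int.floordiv (((high + 1 - low).toNat : Int) - 1) 2 =
        PySem.Int.floordiv (high - low) 2 := by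
      congr 1; omega
    have hmidrel : mid = low + PySem.Int.floordiv (high - low) 2 := hms
    -- both probes return the same element
    have hgA : PySem.List.pyGet? data mid = some (data[mid.toNat]'(by omega)) :=
      PySem.List.pyGet?_eq_some_getElem data (by omega) (by omega)
    have hmB0 : 0 ≤ PySem.Int.floordiv (high - low) 2 := by omega
    have hmB1 : PySem.Int.floordiv (high - low) 2 <
        ((PySem.List.slice data (some low) (some (high + 1))).length : Int) := by
      rw [hlens]; omega
    have hget : PySem.List.pyGet? (PySem.List.slice data (some low) (some (high + 1)))
        (PySem.Int.floordiv (high - low) 2) = PySem.List.pyGet? data mid := by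
      rw [PySem.List.pyGet?_eq_some_getElem _ hmB0 hmB1, hgA]
      congr 1
      simp only [hsub, List.getElem_take, List.getElem_drop]
      congr 1
      omega
    rw [hmidB, hget, hgA]
    by_cases heq : (data[mid.toNat]'(by omega)).2 = t
    · simp [heq]
    · simp only [heq, if_false]
      by_cases hlt : (data[mid.toNat]'(by omega)).2 < t
      · -- recurse right
        simp only [hlt, if_true]
        have harg : PySem.List.slice (PySem.List.slice data (some low) (some (high + 1)))
            (some (PySem.Int.floordiv (high - low) 2 + 1)) none =
            PySem.List.slice data (some (mid + 1)) (some (high + 1)) := by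
          rw [PySem.List.slice_from _ (by omega), hsub, List.drop_take, List.drop_drop,
              PySem.List.slice_toNat data (by omega) (by omega)]
          congr 1
          · omega
          · congr 1
            omega
        rw [harg, loop_eq_alt data t (mid + 1) high (by omega) (by omega) h1]
      · -- recurse left
        simp only [hlt, if_false]
        have harg : PySem.List.slice (PySem.List.slice data (some low) (some (high + 1)))
            none (some (PySem.Int.floordiv (high - low) 2)) =
            PySem.List.slice data (some low) (some (mid - 1 + 1)) := by
          rw [PySem.List.slice_to _ (by omega), hsub, List.take_take,
              show mid - 1 + 1 = mid by ring,
              PySem.List.slice_toNat data (by omega) (by omega)]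
          congr 1
          omega
        rw [harg, loop_eq_alt data t low (mid - 1) h0 (by omega) (by omega)]
  · -- empty window: both sides are none
    have : PySem.List.slice data (some low) (some (high + 1)) = [] := by
      rw [hsub]
      have : (high + 1).toNat - low.toNat = 0 := by omega
      rw [this, List.take_zero]
    rw [searchLoopA, this, search_by_score_alt]
    simp [hlh]
termination_by (high + 1 - low).toNat
decreasing_by
  · omega
  · omega

-- ===== VERDICT (by name: the statement is the Claim_ definition above) =====
theorem search_by_score_spec : Claim_equal_search_by_score := by
  intro data t _
  unfold Spec_search_by_score search_by_score
  rw [loop_eq_alt data t 0 ((data.length : Int) - 1) le_rfl (by omega) (by omega)]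
  congr 1
  rw [show (data.length : Int) - 1 + 1 = ((data.length : Nat) : Int) by omega,
      PySem.List.slice_toNat data (by omega) (by omega)]
  simp
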